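-- pv_equiv track=rewrite | github.com/jackyyy0228/Lyric_ASR | pyutils/exten_lexicon.py | gen_seqs
-- ===== SOURCE A (Python) =====
-- def check_vowel(phone):
--     if phone.startswith(('A','E','I','O','U')):
--         return True
--     else:
--         return False
--
-- def gen_seqs(word,phones):
--     seqs = [word]
--     cnt = 0
--     for phone in phones:
--         if check_vowel(phone):
--             cnt += 1
--     if cnt >3:
--         for phone in phones:
--             seqs[0] = seqs[0] + ' ' + phone
--         return seqs
--     for phone in phones:
--         for idx,seq in enumerate(seqs):
--             seq = seq + ' ' + phone
--             seqs[idx] = seq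
--         if check_vowel(phone):
--             temp = list(seqs)
--             for idx,seq in enumerate(temp):
--                 seq = seq + ' ' + phone
--                 temp[idx] = seq
--             seqs = seqs + temp
--     return seqs
-- ===== SOURCE B (Python) =====
-- def check_vowel(phone):
--     if phone.startswith(('A','E','I','O','U')):
--         return True
--     else:
--         return False
--
-- def gen_seqs(word, phones):
--     vowels = 0
--     for p in phones:
--         if check_vowel(p):
--             vowels += 1
--     if vowels > 3:
--         s = word
--         for p in phones:
--             s = s + ' ' + p
--         return [s]
--     out = []
--     for n in range(2 ** vowels):
--         s = word
--         j = 0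
--         for p in phones:
--             s = s + ' ' + p
--             if check_vowel(p):
--                 if (n >> j) & 1:
--                     s = s + ' ' + p
--                 j += 1
--         out.append(s)
--     return out
-- ===== Notes on version B (the rewrite author's own statement) =====
-- stated objective: alternative
-- what changed: B enumerates the 2^cnt variants directly by a bit mask n (bit j = double the j-th vowel, LSB first) and builds each output string in one pass, instead of A's repeated in-place doubling of the growing seqs list.
import Mathlib
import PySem

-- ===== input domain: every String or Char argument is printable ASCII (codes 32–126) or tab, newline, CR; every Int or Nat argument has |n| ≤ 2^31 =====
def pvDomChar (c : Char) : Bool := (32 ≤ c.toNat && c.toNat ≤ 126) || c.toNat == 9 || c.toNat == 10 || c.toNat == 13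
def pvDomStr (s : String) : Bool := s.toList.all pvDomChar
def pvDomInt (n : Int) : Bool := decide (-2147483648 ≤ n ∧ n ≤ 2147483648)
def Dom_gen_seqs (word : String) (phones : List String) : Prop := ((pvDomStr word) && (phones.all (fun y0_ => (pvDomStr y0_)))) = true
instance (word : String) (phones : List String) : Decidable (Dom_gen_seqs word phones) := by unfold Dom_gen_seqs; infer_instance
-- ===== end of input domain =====

-- B replaces A's repeated list doubling by direct enumeration of the 2^cnt variants
-- indexed by bit masks (objective: alternative, same cost, plainer structure).

-- ===== PORT A =====
-- helper check_vowel (shared: both Pythons define the identical helper)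
def check_vowel (phone : String) : Bool :=
  if PySem.Str.startswith phone "A" || PySem.Str.startswith phone "E" ||
     PySem.Str.startswith phone "I" || PySem.Str.startswith phone "O" ||
     PySem.Str.startswith phone "U" then true else false

def gen_seqs (word : String) (phones : List String) : List String :=
  let cnt : Int := phones.foldl (fun c phone => if check_vowel phone then c + 1 else c) 0
  if cnt > 3 then
    [phones.foldl (fun s phone => s ++ " " ++ phone) word]
  else
    phones.foldl (fun seqs phone =>
      let seqs' := seqs.map (fun seq => seq ++ " " ++ phone)
      if check_vowel phone then seqs' ++ seqs'.map (fun seq => seq ++ " " ++ phone)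
      else seqs') [word]

-- ===== PORT B =====
def gen_seqs_alt (word : String) (phones : List String) : List String :=
  let vowels : Nat := phones.foldl (fun c p => if check_vowel p then c + 1 else c) 0
  if vowels > 3 then
    [phones.foldl (fun s p => s ++ " " ++ p) word]
  else
    (List.range (2 ^ vowels)).map (fun n =>
      (phones.foldl (fun (sj : String × Nat) p =>
        let s := sj.1 ++ " " ++ p
        if check_vowel p then
          ((if (n >>> sj.2) &&& 1 == 1 then s ++ " " ++ p else s), sj.2 + 1)
        else (s, sj.2)) (word, 0)).1)

-- ===== PRECONDITION & SPEC =====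
def Spec_gen_seqs (word : String) (phones : List String) (out : List String) : Prop := out = gen_seqs_alt word phones
instance (word : String) (phones : List String) (out : List String) : Decidable (Spec_gen_seqs word phones out) := by unfold Spec_gen_seqs; infer_instance

-- ===== CLAIM (what is proved, stated in full; the proofs are below) =====
def Claim_equal_gen_seqs : Prop := ∀ (word : String) (phones : List String), Dom_gen_seqs word phones → Spec_gen_seqs word phones (gen_seqs word phones)

-- ===== LEMMAS AND PROOFS =====

-- number of vowel phones
def cntV (phones : List String) : Nat := phones.countP (fun p => check_vowel p)

-- B's inner loop body
def stepB (n : Nat) (sj : String × Nat) (p : String) : String × Nat :=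
  let s := sj.1 ++ " " ++ p
  if check_vowel p then
    ((if (n >>> sj.2) &&& 1 == 1 then s ++ " " ++ p else s), sj.2 + 1)
  else (s, sj.2)

-- A's outer loop body
def stepA (seqs : List String) (p : String) : List String :=
  let seqs' := seqs.map (fun seq => seq ++ " " ++ p)
  if check_vowel p then seqs' ++ seqs'.map (fun seq => seq ++ " " ++ p) else seqs'

lemma bit_eq_testBit (n i : Nat) : ((n >>> i) &&& 1 == 1) = n.testBit i := by
  simp [Nat.testBit, Nat.and_comm]

lemma countInt (phones : List String) (c : Int) :
    phones.foldl (fun c phone => if check_vowel phone then c + 1 else c) c = c + cntV phones := by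
  induction phones generalizing c with
  | nil => simp [cntV]
  | cons p ps ih =>
    simp only [List.foldl_cons, cntV, List.countP_cons]
    by_cases h : check_vowel p <;> simp [h, ih, cntV, add_comm, add_left_comm]

lemma countNat (phones : List String) (c : Nat) :
    phones.foldl (fun c p => if check_vowel p then c + 1 else c) c = c + cntV phones := by
  induction phones generalizing c with
  | nil => simp [cntV]
  | cons p ps ih =>
    simp only [List.foldl_cons, cntV, List.countP_cons]
    by_cases h : check_vowel p <;> simp [h, ih, cntV, add_comm, add_left_comm]

lemma stepB_snd (phones : List String) (n : Nat) (s : String) (j : Nat) :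
    (phones.foldl (stepB n) (s, j)).2 = j + cntV phones := by
  induction phones generalizing s j with
  | nil => simp [cntV]
  | cons p ps ih =>
    simp only [List.foldl_cons, stepB, cntV, List.countP_cons]
    by_cases h : check_vowel p <;> simp [h, ih, cntV, add_comm, add_left_comm]

-- the fold only consults bits j … j + cntV phones - 1 of n
lemma stepB_bits (phones : List String) (n m : Nat) (s : String) (j : Nat)
    (h : ∀ i, j ≤ i → i < j + cntV phones → n.testBit i = m.testBit i) :
    phones.foldl (stepB n) (s, j) = phones.foldl (stepB m) (s, j) := by
  induction phones generalizing s j with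
  | nil => rfl
  | cons p ps ih =>
    simp only [List.foldl_cons, stepB]
    by_cases hv : check_vowel p
    · have hc : cntV (p :: ps) = cntV ps + 1 := by simp [cntV, hv]
      have hb : n.testBit j = m.testBit j := h j le_rfl (by rw [hc]; omega)
      simp only [hv, if_true, bit_eq_testBit, hb]
      exact ih _ _ (fun i h1 h2 => h i (by omega) (by rw [hc]; omega))
    · have hc : cntV (p :: ps) = cntV ps := by simp [cntV, hv]
      simp only [hv]
      exact ih _ _ (fun i h1 h2 => h i h1 (by rw [hc]; omega))

-- main invariant: A's loop state is exactly B's variants, bit j ↔ j-th vowel doubled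
lemma main_inv (phones : List String) (word : String) :
    phones.foldl stepA [word]
      = (List.range (2 ^ cntV phones)).map
          (fun n => (phones.foldl (stepB n) (word, 0)).1) := by
  induction phones using List.reverseRecOn with
  | nil => simp [cntV]
  | append_singleton ps p ih =>
    have hcnt : ∀ n, (ps.foldl (stepB n) (word, (0:Nat))).2 = cntV ps := fun n => by
      simpa using stepB_snd ps n word 0
    by_cases hv : check_vowel p
    · have hc : cntV (ps ++ [p]) = cntV ps + 1 := by
        simp [cntV, List.countP_append, hv]
      rw [List.foldl_append, ih, hc]
      have hpow : 2 ^ (cntV ps + 1) = 2 ^ cntV ps + 2 ^ cntV ps := by ring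
      rw [hpow, List.range_add, List.map_append, List.map_map]
      simp only [List.foldl_append, List.foldl_cons, List.foldl_nil]
      unfold stepA
      simp only [hv, if_true, List.map_map]
      congr 1
      · -- low half: bit (cntV ps) is 0, single copy appended
        apply List.map_congr_left
        intro n hn
        rw [List.mem_range] at hn
        simp only [Function.comp, stepB, bit_eq_testBit, hcnt, hv, if_true,
          Nat.testBit_lt_two_pow hn]
        simp
      · -- high half: bit (cntV ps) is 1, doubled copy; low bits unchanged
        apply List.map_congr_left
        intro n hn
        rw [List.mem_range] at hn
        have hlow : ps.foldl (stepB (2 ^ cntV ps + n)) (word, 0)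
            = ps.foldl (stepB n) (word, 0) := by
          apply stepB_bits
          intro i hi1 hi2
          exact Nat.testBit_two_pow_add_gt (by omega) n
        have hbit : (2 ^ cntV ps + n).testBit (cntV ps) = true := by
          rw [Nat.testBit_two_pow_add_eq]
          simp [Nat.testBit_lt_two_pow hn]
        simp only [Function.comp, stepB, bit_eq_testBit, hlow, hcnt, hv, if_true, hbit]
    · have hc : cntV (ps ++ [p]) = cntV ps := by
        simp [cntV, List.countP_append, hv]
      rw [List.foldl_append, ih, hc]
      simp only [List.foldl_append, List.foldl_cons, List.foldl_nil]
      unfold stepA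
      simp only [hv, List.map_map]
      apply List.map_congr_left
      intro n hn
      simp [Function.comp, stepB, hv]

-- ===== VERDICT (by name: the statement is the Claim_ definition above) =====
theorem gen_seqs_spec : Claim_equal_gen_seqs := by
  intro word phones _
  unfold Spec_gen_seqs gen_seqs gen_seqs_alt
  have hA : phones.foldl (fun c phone => if check_vowel phone then c + 1 else c) (0:Int)
      = (cntV phones : Int) := by simpa using countInt phones 0
  have hB : phones.foldl (fun c p => if check_vowel p then c + 1 else c) (0:Nat)
      = cntV phones := by simpa using countNat phones 0
  rw [hA, hB]
  by_cases h3 : cntV phones > 3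
  · rw [if_pos (by exact_mod_cast h3), if_pos h3]
  · rw [if_neg (by exact_mod_cast h3), if_neg h3]
    exact main_inv phones word
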